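-- pv_equiv track=rewrite | github.com/quintonfesq04/RealSports | schedule_seed.py | _aggregate_teams
-- ===== SOURCE A (Python) =====
-- from typing import Dict, List, Tuple, Set, Optional
--
-- def _aggregate_teams(games: List[Tuple[str, str]]) -> List[str]:
--     seen = set(); out = []
--     for t1, t2 in games:
--         for t in (t1, t2):
--             if t and t not in seen:
--                 seen.add(t); out.append(t)
--     out.sort()
--     return out
-- ===== SOURCE B (Python) =====
-- def _aggregate_teams(games):
--     names = []
--     for t1, t2 in games:
--         if t1:
--             names.append(t1)
--         if t2:
--             names.append(t2)
--     names.sort()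
--     out = []
--     prev = None
--     for t in names:
--         if t != prev:
--             out.append(t)
--             prev = t
--     return out
-- ===== Notes on version B (the rewrite author's own statement) =====
-- stated objective: alternative
-- what changed: B flattens all non-empty names into one multiset list, sorts it, and deduplicates by adjacency in a single pass keeping only the previously emitted name, instead of A's hash-set first-occurrence dedup followed by sorting.
import Mathlib
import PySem

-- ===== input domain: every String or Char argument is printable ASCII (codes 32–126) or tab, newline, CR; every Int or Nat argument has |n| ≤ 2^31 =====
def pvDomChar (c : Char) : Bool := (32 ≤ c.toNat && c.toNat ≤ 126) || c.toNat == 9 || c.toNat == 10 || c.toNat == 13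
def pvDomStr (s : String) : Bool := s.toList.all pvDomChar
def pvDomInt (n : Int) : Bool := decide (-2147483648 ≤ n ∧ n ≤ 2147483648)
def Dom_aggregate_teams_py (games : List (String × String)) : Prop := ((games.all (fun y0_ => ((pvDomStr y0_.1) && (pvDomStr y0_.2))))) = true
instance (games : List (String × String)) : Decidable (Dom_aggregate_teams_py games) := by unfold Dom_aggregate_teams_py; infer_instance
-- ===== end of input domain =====

-- B sorts the full multiset of non-empty names and dedups by adjacency (keeping only the previous
-- emitted name), instead of A's hash-set first-occurrence dedup followed by sorting: alternative decomposition.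

-- ===== PORT A =====
def aggregate_teams_py (games : List (String × String)) : List String :=
  let st := games.foldl
    (fun (st : PySem.Set String × List String) g =>
      [g.1, g.2].foldl
        (fun (st : PySem.Set String × List String) t =>
          if t ≠ "" ∧ t ∉ st.1 then (PySem.Set.add st.1 t, st.2 ++ [t]) else st)
        st)
    (PySem.Set.empty, [])
  PySem.List.sorted st.2 (fun x => x) false

-- ===== PORT B =====
def aggregate_teams_py_alt (games : List (String × String)) : List String :=
  let names := games.foldl
    (fun (acc : List String) g =>
      let acc := if g.1 ≠ "" then acc ++ [g.1] else acc
      if g.2 ≠ "" then acc ++ [g.2] else acc)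
    []
  let names := PySem.List.sorted names (fun x => x) false
  let r := names.foldl
    (fun (st : List String × Option String) t =>
      if some t ≠ st.2 then (st.1 ++ [t], some t) else st)
    ([], none)
  r.1

-- ===== PRECONDITION & SPEC =====
def Spec_aggregate_teams_py (games : List (String × String)) (out : List String) : Prop := out = aggregate_teams_py_alt games
instance (games : List (String × String)) (out : List String) : Decidable (Spec_aggregate_teams_py games out) := by unfold Spec_aggregate_teams_py; infer_instance

-- ===== CLAIM (what is proved, stated in full; the proofs are below) =====
def Claim_equal_aggregate_teams_py : Prop := ∀ (games : List (String × String)), Dom_aggregate_teams_py games → Spec_aggregate_teams_py games (aggregate_teams_py games)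

-- ===== LEMMAS AND PROOFS =====

-- the multiset of non-empty names, in game order
def pvFlat (games : List (String × String)) : List String :=
  games.flatMap (fun g => (if g.1 ≠ "" then [g.1] else []) ++ (if g.2 ≠ "" then [g.2] else []))

-- recursive form of B's adjacency-dedup pass
def pvAdj : Option String → List String → List String
  | _, [] => []
  | prev, t :: ts => if some t ≠ prev then t :: pvAdj (some t) ts else pvAdj prev ts

theorem pv_bnames (games : List (String × String)) (acc : List String) :
    games.foldl
      (fun (acc : List String) g =>
        let acc := if g.1 ≠ "" then acc ++ [g.1] else acc
        if g.2 ≠ "" then acc ++ [g.2] else acc) acc = acc ++ pvFlat games := by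
  induction games generalizing acc with
  | nil => simp [pvFlat]
  | cons g gs ih =>
    simp only [pvFlat, List.flatMap_cons, List.foldl_cons] at *
    rw [ih]
    split_ifs <;> simp

theorem pv_adj_foldl (s : List String) (out : List String) (prev : Option String) :
    (s.foldl
      (fun (st : List String × Option String) t =>
        if some t ≠ st.2 then (st.1 ++ [t], some t) else st) (out, prev)).1
      = out ++ pvAdj prev s := by
  induction s generalizing out prev with
  | nil => simp [pvAdj]
  | cons t ts ih =>
    simp only [List.foldl_cons, pvAdj]
    by_cases h : some t ≠ prev
    · simp only [if_pos h, ih, List.append_assoc, List.singleton_append]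
    · simp only [if_neg h, ih]

theorem pv_aloop (games : List (String × String)) (l : List String) :
    games.foldl
      (fun (st : PySem.Set String × List String) g =>
        [g.1, g.2].foldl
          (fun (st : PySem.Set String × List String) t =>
            if t ≠ "" ∧ t ∉ st.1 then (PySem.Set.add st.1 t, st.2 ++ [t]) else st)
          st)
      (l, l)
      = ((pvFlat games).foldl PySem.Set.add l, (pvFlat games).foldl PySem.Set.add l) := by
  induction games generalizing l with
  | nil => simp [pvFlat]
  | cons g gs ih =>
    have hstep : ∀ (m : List String) (t : String),
        (if t ≠ "" ∧ t ∉ m then (PySem.Set.add m t, m ++ [t]) else ((m, m) : PySem.Set String × List String))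
          = (if t ≠ "" then PySem.Set.add m t else m, if t ≠ "" then PySem.Set.add m t else m) := by
      intro m t
      by_cases h0 : t = ""
      · simp [h0]
      · by_cases hm : t ∈ m
        · simp [h0, hm]
        · simp [h0, hm]
    have hgame : [g.1, g.2].foldl
        (fun (st : PySem.Set String × List String) t =>
          if t ≠ "" ∧ t ∉ st.1 then (PySem.Set.add st.1 t, st.2 ++ [t]) else st) (l, l)
        = ((((if g.1 ≠ "" then [g.1] else []) ++ (if g.2 ≠ "" then [g.2] else [])).foldl PySem.Set.add l),
           (((if g.1 ≠ "" then [g.1] else []) ++ (if g.2 ≠ "" then [g.2] else [])).foldl PySem.Set.add l)) := by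
      simp only [List.foldl_cons, List.foldl_nil]
      rw [hstep l g.1, hstep _ g.2]
      split_ifs <;> simp
    rw [List.foldl_cons, hgame, ih]
    simp only [pvFlat, List.flatMap_cons, List.foldl_append]

theorem pv_adj_some (s : List String) (hs : s.Pairwise (· ≤ ·)) :
    ∀ p : String, (∀ y ∈ s, p ≤ y) →
      (∀ x, x ∈ pvAdj (some p) s ↔ x ∈ s ∧ x ≠ p) ∧ (p :: pvAdj (some p) s).Pairwise (· < ·) := by
  induction s with
  | nil => intro p _; simp [pvAdj]
  | cons t ts ih =>
    intro p hp
    obtain ⟨ht, hts⟩ := List.pairwise_cons.mp hs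
    have hpt : p ≤ t := hp t (by simp)
    by_cases hne : t = p
    · subst hne
      have hskip : pvAdj (some t) (t :: ts) = pvAdj (some t) ts := by simp [pvAdj]
      have H := ih hts t ht
      rw [hskip]
      refine ⟨fun x => ?_, H.2⟩
      rw [H.1 x, List.mem_cons]
      constructor
      · rintro ⟨hx, hxt⟩; exact ⟨Or.inr hx, hxt⟩
      · rintro ⟨hx | hx, hxt⟩
        · exact absurd hx hxt
        · exact ⟨hx, hxt⟩
    · have hlt : p < t := lt_of_le_of_ne hpt (fun h => hne h.symm)
      have hkeep : pvAdj (some p) (t :: ts) = t :: pvAdj (some t) ts := by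
        simp [pvAdj, hne]
      have H := ih hts t ht
      rw [hkeep]
      constructor
      · intro x
        rw [List.mem_cons, H.1 x, List.mem_cons]
        constructor
        · rintro (rfl | ⟨hx, hxt⟩)
          · exact ⟨Or.inl rfl, fun h => hne h⟩
          · have hpx : p < x := lt_of_lt_of_le hlt (ht x hx)
            exact ⟨Or.inr hx, fun h => absurd (h ▸ hpx) (lt_irrefl p)⟩
        · rintro ⟨rfl | hx, hxp⟩
          · exact Or.inl rfl
          · by_cases hxt : x = t
            · exact Or.inl hxt
            · exact Or.inr ⟨hx, hxt⟩
      · refine List.pairwise_cons.mpr ⟨?_, H.2⟩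
        intro y hy
        rcases List.mem_cons.mp hy with rfl | hy
        · exact hlt
        · exact lt_of_lt_of_le hlt (ht y ((H.1 y).mp hy).1)

theorem pv_adj_none (s : List String) (hs : s.Pairwise (· ≤ ·)) :
    (∀ x, x ∈ pvAdj none s ↔ x ∈ s) ∧ (pvAdj none s).Pairwise (· < ·) := by
  cases s with
  | nil => simp [pvAdj]
  | cons t ts =>
    obtain ⟨ht, hts⟩ := List.pairwise_cons.mp hs
    have h := pv_adj_some ts hts t (fun y hy => ht y hy)
    simp only [pvAdj, ne_eq, reduceCtorEq, not_false_eq_true, if_pos]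
    constructor
    · intro x
      rw [List.mem_cons, (h.1 x), List.mem_cons]
      constructor
      · rintro (rfl | ⟨hx, _⟩)
        · exact Or.inl rfl
        · exact Or.inr hx
      · rintro (rfl | hx)
        · exact Or.inl rfl
        · by_cases hxt : x = t
          · exact Or.inl hxt
          · exact Or.inr ⟨hx, hxt⟩
    · exact h.2

-- ===== VERDICT (by name: the statement is the Claim_ definition above) =====
theorem aggregate_teams_py_spec : Claim_equal_aggregate_teams_py := by
  intro games _
  unfold Spec_aggregate_teams_py aggregate_teams_py aggregate_teams_py_alt
  rw [show ((PySem.Set.empty : PySem.Set String), ([] : List String)) = (([] : List String), ([] : List String)) from rfl]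
  rw [pv_aloop, pv_bnames, pv_adj_foldl]
  simp only [List.nil_append]
  have hofl : (pvFlat games).foldl PySem.Set.add [] = PySem.List.dedup (pvFlat games) := by
    rw [PySem.List.dedup_eq_ofList, PySem.Set.ofList_eq_foldl]
  rw [hofl]
  set s := PySem.List.sorted (pvFlat games) (fun x => x) false with hsdef
  have hs : s.Pairwise (· ≤ ·) := by
    have := PySem.List.sorted_pairwise (xs := pvFlat games) (key := fun x => x)
    simpa using this
  obtain ⟨hmem, hpw⟩ := pv_adj_none s hs
  have hnd : (pvAdj none s).Nodup := hpw.imp (fun h => ne_of_lt h)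
  have hperm : (pvAdj none s).Perm (PySem.List.dedup (pvFlat games)) := by
    rw [List.perm_ext_iff_of_nodup hnd (PySem.List.nodup_dedup _)]
    intro x
    rw [hmem x, hsdef, PySem.List.mem_sorted, PySem.List.mem_dedup]
  exact PySem.List.sorted_eq_of_perm_of_pairwise_lt _ _ (fun x => x) hperm hpw
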